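-- pv_equiv track=rewrite | github.com/WilliamZR/unifee | src/my_methods/graph_evidence_extraction/all_cell_util.py | connect_cell_inset
-- ===== SOURCE A (Python) =====
-- def connect_cell_inset(edge_set, node_set, id_sequence):
--     for i in node_set:#i is cell_id
--         if i not in id_sequence:
--             continue
--         for j in node_set:
--             if j not in id_sequence:
--                 continue
--             edge_set.add((id_sequence.index(i), id_sequence.index(j)))
--     return edge_set, set()
-- ===== SOURCE B (Python) =====
-- def connect_cell_inset(edge_set, node_set, id_sequence):
--     idx = {id_sequence.index(x) for x in node_set if x in id_sequence}
--     edge_set.update((a, b) for a in idx for b in idx)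
--     return edge_set, set()
-- ===== Notes on version B (the rewrite author's own statement) =====
-- stated objective: faster
-- what changed: B first collapses node_set to the set of distinct indices of its members in id_sequence (one pass, one index() scan per node), then emits the full cartesian product of that index set, instead of A's nested loop over node_set that re-runs membership tests and two index() scans for every ordered pair.
import Mathlib
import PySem

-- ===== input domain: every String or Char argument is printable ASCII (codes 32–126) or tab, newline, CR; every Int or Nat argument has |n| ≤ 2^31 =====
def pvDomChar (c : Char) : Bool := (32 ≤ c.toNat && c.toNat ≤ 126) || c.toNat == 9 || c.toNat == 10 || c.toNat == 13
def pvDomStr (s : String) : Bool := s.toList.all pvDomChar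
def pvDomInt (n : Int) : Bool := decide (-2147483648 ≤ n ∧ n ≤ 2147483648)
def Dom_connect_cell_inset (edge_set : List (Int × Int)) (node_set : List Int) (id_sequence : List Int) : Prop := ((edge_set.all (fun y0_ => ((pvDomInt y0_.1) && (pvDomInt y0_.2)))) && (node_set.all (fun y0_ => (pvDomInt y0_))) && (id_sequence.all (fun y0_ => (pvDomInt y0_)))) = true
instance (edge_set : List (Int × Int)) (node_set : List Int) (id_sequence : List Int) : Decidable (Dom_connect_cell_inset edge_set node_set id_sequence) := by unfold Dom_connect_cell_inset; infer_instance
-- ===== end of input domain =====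

-- B collapses node_set to the distinct indices once and then emits their cartesian
-- product, instead of A's guarded nested loop over node_set (objective: faster). Both Pythons
-- mutate edge_set in place identically (set.add / set.update); the claim is about
-- the returned value.

-- id_sequence.index(x); in both ports it is only applied under the guard x ∈ seq,
-- where index? is some, so the default 0 is never used (exact there).
def pvIdx (seq : List Int) (x : Int) : Int := (((PySem.List.index? seq x).getD 0 : Nat) : Int)

-- ===== PORT A =====
def connect_cell_inset (edge_set : List (Int × Int)) (node_set : List Int) (id_sequence : List Int) : (List (Int × Int)) × List Int :=
  (node_set.foldl (fun es i =>
      if i ∈ id_sequence then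
        node_set.foldl (fun es j =>
          if j ∈ id_sequence then PySem.Set.add es (pvIdx id_sequence i, pvIdx id_sequence j)
          else es) es
      else es) edge_set,
   [])

-- ===== PORT B =====
-- set comprehension over the guarded nodes, then product over the index set.
-- (the Set 'idx' is consumed only to build another Set, so its order cannot matter)
def connect_cell_inset_alt (edge_set : List (Int × Int)) (node_set : List Int) (id_sequence : List Int) : (List (Int × Int)) × List Int :=
  let idx : PySem.Set Int :=
    PySem.Set.ofList ((node_set.filter (fun x => decide (x ∈ id_sequence))).map (pvIdx id_sequence))
  (idx.foldl (fun es a => idx.foldl (fun es b => PySem.Set.add es (a, b)) es) edge_set,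
   [])

-- ===== PRECONDITION & SPEC =====
def Spec_connect_cell_inset (edge_set : List (Int × Int)) (node_set : List Int) (id_sequence : List Int) (out : (List (Int × Int)) × List Int) : Prop := out = connect_cell_inset_alt edge_set node_set id_sequence
instance (edge_set : List (Int × Int)) (node_set : List Int) (id_sequence : List Int) (out : (List (Int × Int)) × List Int) : Decidable (Spec_connect_cell_inset edge_set node_set id_sequence out) := by unfold Spec_connect_cell_inset; infer_instance

-- ===== CLAIM (what is proved, stated in full; the proofs are below) =====
def Claim_equal_connect_cell_inset : Prop := ∀ (edge_set : List (Int × Int)) (node_set : List Int) (id_sequence : List Int), Dom_connect_cell_inset edge_set node_set id_sequence → Spec_connect_cell_inset edge_set node_set id_sequence (connect_cell_inset edge_set node_set id_sequence)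

-- ===== LEMMAS AND PROOFS =====

-- A guarded fold over ns equals the fold over the guard-filtered, mapped list.
theorem pv_foldl_guard {S : Type} (p : Int → Bool) (f : Int → Int) (g : S → Int → S) :
    ∀ (ns : List Int) (s : S),
      ns.foldl (fun s i => if p i then g s (f i) else s) s
        = ((ns.filter p).map f).foldl g s := by
  intro ns
  induction ns with
  | nil => intro s; rfl
  | cons x t ih =>
    intro s
    by_cases hx : p x = true
    · simp only [List.foldl_cons, hx, if_pos, List.filter_cons_of_pos hx, List.map_cons]
      exact ih _
    · simp only [List.foldl_cons, hx, if_neg, Bool.false_eq_true, not_false_iff,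
        List.filter_cons_of_neg (by simpa using hx)]
      exact ih _

-- pointwise-equal step functions give equal folds
theorem pv_foldl_congr {S α : Type} {g h : S → α → S} (hgh : ∀ s a, g s a = h s a) :
    ∀ (t : List α) (s : S), t.foldl g s = t.foldl h s := by
  intro t
  induction t with
  | nil => intro s; rfl
  | cons x r ih => intro s; rw [List.foldl_cons, List.foldl_cons, hgh]; exact ih _

theorem pv_add_of_mem {α : Type} [BEq α] [LawfulBEq α] (s : PySem.Set α) (x : α)
    (h : x ∈ s) : PySem.Set.add s x = s := by
  simp [PySem.Set.add, h]

theorem pv_add_of_not_mem {α : Type} [BEq α] [LawfulBEq α] (s : PySem.Set α) (x : α)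
    (h : x ∉ s) : PySem.Set.add s x = s ++ [x] := by
  simp [PySem.Set.add, h]

-- first-occurrence dedup, structurally recursive
def pvDedup : List Int → List Int
  | [] => []
  | x :: t => x :: (pvDedup t).filter (fun y => decide (y ≠ x))

-- pvDedup commutes with filtering out one value
theorem pv_dedup_filter (x : Int) :
    ∀ (l : List Int), pvDedup (l.filter (fun y => decide (y ≠ x)))
      = (pvDedup l).filter (fun y => decide (y ≠ x)) := by
  intro l
  induction l with
  | nil => rfl
  | cons y r ih =>
    by_cases hy : y = x
    · subst hy
      rw [List.filter_cons_of_neg (by simp), ih, pvDedup,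
        List.filter_cons_of_neg (by simp), List.filter_filter]
      apply List.filter_congr
      intro z _
      by_cases hz : z = y <;> simp [hz]
    · rw [List.filter_cons_of_pos (by simpa using hy), pvDedup, pvDedup, ih,
        List.filter_cons_of_pos (by simpa using hy), List.filter_filter, List.filter_filter]
      congr 1
      apply List.filter_congr
      intro z _
      by_cases h1 : z = x <;> by_cases h2 : z = y <;> simp [h1, h2]

-- foldl add from any accumulator s appends the dedup of the not-yet-present elements.
theorem pv_foldl_add_eq : ∀ (t : List Int) (s : PySem.Set Int),
    t.foldl PySem.Set.add s = s ++ pvDedup (t.filter (fun y => decide (y ∉ s))) := by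
  intro t
  induction t with
  | nil => intro s; simp [pvDedup]
  | cons x r ih =>
    intro s
    by_cases hx : x ∈ s
    · rw [List.foldl_cons, pv_add_of_mem s x hx, ih s, List.filter_cons_of_neg (by simp [hx])]
    · rw [List.foldl_cons, pv_add_of_not_mem s x hx, ih (s ++ [x]),
        List.filter_cons_of_pos (by simp [hx])]
      have hfil : r.filter (fun y => decide (y ∉ s ++ [x]))
          = (r.filter (fun y => decide (y ∉ s))).filter (fun y => decide (y ≠ x)) := by
        rw [List.filter_filter]
        apply List.filter_congr
        intro y _
        by_cases h1 : y = x <;> by_cases h2 : y ∈ s <;> simp [h1, h2]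
      rw [hfil, pv_dedup_filter, pvDedup, List.append_assoc]
      rfl

theorem pv_ofList_eq_dedup (t : List Int) : PySem.Set.ofList t = pvDedup t := by
  have := pv_foldl_add_eq t []
  simpa [PySem.Set.ofList, PySem.Set.empty] using this

-- Processing an already-absorbed element can be dropped from a fold.
theorem pv_foldl_erase {S : Type} (f : S → Int → S) (mem : Int → S → Prop)
    (h2 : ∀ s a b, mem a s → mem a (f s b))
    (h3 : ∀ s a, mem a s → f s a = s)
    (a : Int) :
    ∀ (t : List Int) (s : S), mem a s →
      t.foldl f s = (t.filter (fun y => decide (y ≠ a))).foldl f s := by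
  intro t
  induction t with
  | nil => intro s _; rfl
  | cons b r ih =>
    intro s hs
    by_cases hb : b = a
    · subst hb
      rw [List.foldl_cons, h3 s b hs, List.filter_cons_of_neg (by simp)]
      exact ih s hs
    · rw [List.foldl_cons, List.filter_cons_of_pos (by simpa using hb), List.foldl_cons]
      exact ih (f s b) (h2 s a b hs)

-- A fold whose step absorbs permanently may be run over the deduplicated list.
theorem pv_foldl_dedup {S : Type} (f : S → Int → S) (mem : Int → S → Prop)
    (h1 : ∀ s a, mem a (f s a))
    (h2 : ∀ s a b, mem a s → mem a (f s b))
    (h3 : ∀ s a, mem a s → f s a = s) :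
    ∀ (t : List Int) (s : S), t.foldl f s = (pvDedup t).foldl f s := by
  intro t
  induction t with
  | nil => intro s; rfl
  | cons x r ih =>
    intro s
    rw [pvDedup, List.foldl_cons, List.foldl_cons, ih (f s x),
      ← pv_foldl_erase f mem h2 h3 x (pvDedup r) (f s x) (h1 s x)]

-- a freshly added pair is a member
theorem pv_mem_add_self (s : List (Int × Int)) (e : Int × Int) : e ∈ PySem.Set.add s e := by
  by_cases hm : e ∈ s
  · rwa [pv_add_of_mem s e hm]
  · rw [pv_add_of_not_mem s e hm]; simp

-- membership in the edge accumulator persists under further adds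
theorem pv_mem_add_pair (s : List (Int × Int)) (e e' : Int × Int) (h : e ∈ s) :
    e ∈ PySem.Set.add s e' := by
  by_cases h' : e' ∈ s
  · rwa [pv_add_of_mem s e' h']
  · rw [pv_add_of_not_mem s e' h']; exact List.mem_append_left _ h

-- membership persists across the inner fold
theorem pv_mem_inner (a : Int) (e : Int × Int) :
    ∀ (t : List Int) (s : List (Int × Int)), e ∈ s →
      e ∈ t.foldl (fun s b => PySem.Set.add s (a, b)) s := by
  intro t
  induction t with
  | nil => intro s h; exact h
  | cons c r ih => intro s h; exact ih _ (pv_mem_add_pair s e (a, c) h)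

-- every pair (a,b), b ∈ t, is present after the inner fold
theorem pv_inner_covers (a : Int) :
    ∀ (t : List Int) (s : List (Int × Int)) (b : Int), b ∈ t →
      (a, b) ∈ t.foldl (fun s b => PySem.Set.add s (a, b)) s := by
  intro t
  induction t with
  | nil => intro s b h; cases h
  | cons c r ih =>
    intro s b h
    rcases List.mem_cons.mp h with h | h
    · subst h
      exact pv_mem_inner a (a, b) r _ (pv_mem_add_self s (a, b))
    · exact ih _ b h

-- the inner fold is a no-op when every pair is already present
theorem pv_inner_noop (a : Int) :
    ∀ (t : List Int) (s : List (Int × Int)), (∀ b ∈ t, (a, b) ∈ s) →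
      t.foldl (fun s b => PySem.Set.add s (a, b)) s = s := by
  intro t
  induction t with
  | nil => intro s _; rfl
  | cons c r ih =>
    intro s h
    rw [List.foldl_cons, pv_add_of_mem s _ (h c (by simp))]
    exact ih s (fun b hb => h b (by simp [hb]))

-- ===== VERDICT (by name: the statement is the Claim_ definition above) =====
theorem connect_cell_inset_spec : Claim_equal_connect_cell_inset := by
  intro es ns seq _
  unfold Spec_connect_cell_inset connect_cell_inset connect_cell_inset_alt
  apply Prod.ext
  swap
  · rfl
  simp only
  set p : Int → Bool := fun x => decide (x ∈ seq) with hp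
  set f : Int → Int := pvIdx seq with hf
  set L : List Int := (ns.filter p).map f with hL
  -- A's outer and inner guarded folds become folds over L
  have hinner : ∀ (a : Int) (s : List (Int × Int)),
      ns.foldl (fun es j => if j ∈ seq then PySem.Set.add es (a, f j) else es) s
        = L.foldl (fun es b => PySem.Set.add es (a, b)) s := by
    intro a s
    have := pv_foldl_guard p f (fun es b => PySem.Set.add es (a, b)) ns s
    simpa [hp] using this
  have hAL : ns.foldl (fun es i =>
      if i ∈ seq then
        ns.foldl (fun es j => if j ∈ seq then PySem.Set.add es (f i, f j) else es) es
      else es) es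
      = L.foldl (fun es a => L.foldl (fun es b => PySem.Set.add es (a, b)) es) es := by
    have houter := pv_foldl_guard p f
      (fun es a => ns.foldl (fun es j => if j ∈ seq then PySem.Set.add es (a, f j) else es) es) ns es
    calc ns.foldl (fun es i =>
          if i ∈ seq then
            ns.foldl (fun es j => if j ∈ seq then PySem.Set.add es (f i, f j) else es) es
          else es) es
        = L.foldl (fun es a =>
            ns.foldl (fun es j => if j ∈ seq then PySem.Set.add es (a, f j) else es) es) es := by
          simpa [hp] using houter
      _ = L.foldl (fun es a => L.foldl (fun es b => PySem.Set.add es (a, b)) es) es :=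
          pv_foldl_congr (fun s a => hinner a s) L es
  rw [hAL]
  -- dedup the inner fold: L ~> ofList L = pvDedup L
  have hinnerD : ∀ (s : List (Int × Int)) (a : Int),
      L.foldl (fun es b => PySem.Set.add es (a, b)) s
        = (PySem.Set.ofList L).foldl (fun es b => PySem.Set.add es (a, b)) s := by
    intro s a
    rw [pv_ofList_eq_dedup]
    exact pv_foldl_dedup (fun es b => PySem.Set.add es (a, b)) (fun b s => (a, b) ∈ s)
      (fun s b => pv_mem_add_self s (a, b))
      (fun s b c h => pv_mem_add_pair s (a, b) (a, c) h)
      (fun s b h => pv_add_of_mem s _ h)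
      L s
  rw [pv_foldl_congr hinnerD L es]
  -- dedup the outer fold: L ~> ofList L = pvDedup L
  have houterD := pv_foldl_dedup
    (fun es a => (PySem.Set.ofList L).foldl (fun es b => PySem.Set.add es (a, b)) es)
    (fun a s => ∀ b ∈ PySem.Set.ofList L, (a, b) ∈ s)
    (fun s a b hb => pv_inner_covers a (PySem.Set.ofList L) s b hb)
    (fun s a c h b hb => pv_mem_inner c (a, b) (PySem.Set.ofList L) s (h b hb))
    (fun s a h => pv_inner_noop a (PySem.Set.ofList L) s h)
    L es
  rw [← pv_ofList_eq_dedup] at houterD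
  exact houterD
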